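-- pv_equiv track=rewrite | github.com/ishaanbuildsthings/leetcode | problems/Leetcode/3874. Valid Subarrays With Exactly One Peak.py | validSubarrays
-- ===== SOURCE A (Python) =====
-- def validSubarrays(nums: list[int], k: int) -> int:
--     # basically a subarray is valid if it contains 1 peak
--     # and both ends are within K from that peak
--     n = len(nums)
--     peak = [False] * n
--     for i in range(1, n - 1):
--         if nums[i] > max(nums[i-1],nums[i+1]):
--             peak[i] = True
--
--     prevPeak = [-1] * n
--     currPeak = -1
--     for i in range(n):
--         prevPeak[i] = currPeak
--         if peak[i]:
--             currPeak = i
--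
--     nextPeak = [n] * n
--     currPeak = n
--     for i in range(n - 1, -1, -1):
--         nextPeak[i] = currPeak
--         if peak[i]:
--             currPeak = i
--
--     res = 0
--
--     for i in range(1, n - 1):
--         if not peak[i]:
--             continue
--         prevRange = prevPeak[i] + 1
--         nextRange = nextPeak[i] - 1
--         leftOpts = min(k + 1, i - prevRange + 1)
--         rightOpts = min(k + 1, nextRange - i + 1)
--         res += leftOpts * rightOpts
--
--     return res
-- ===== SOURCE B (Python) =====
-- def validSubarrays(nums: list[int], k: int) -> int:
--     # single online pass, O(1) extra space: each peak's right-options are settled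
--     # lazily when the next peak (or the end) is reached; the gap distance d is
--     # shared: it is the previous peak's right factor and the new peak's left factor
--     n = len(nums)
--     res = 0
--     prev = -1      # most recent peak seen, -1 if none yet
--     leftOpts = 0   # that peak's pending left-options
--     for i in range(1, n - 1):
--         if nums[i] > nums[i - 1] and nums[i] > nums[i + 1]:
--             d = min(k + 1, i - prev)
--             if prev >= 0:
--                 res += leftOpts * d
--             leftOpts = d
--             prev = i
--     if prev >= 0:
--         res += leftOpts * min(k + 1, n - prev)
--     return res
-- ===== Notes on version B (the rewrite author's own statement) =====
-- stated objective: simpler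
-- what changed: B is a single online left-to-right pass with O(1) state (last peak index, its pending left-options, accumulator): each peak's right factor is settled lazily when the next peak or the end arrives, and the gap distance min(k+1, i-prev) is computed once and reused as both the old peak's right factor and the new peak's left factor; A's three auxiliary arrays and four passes disappear entirely.
import Mathlib
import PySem

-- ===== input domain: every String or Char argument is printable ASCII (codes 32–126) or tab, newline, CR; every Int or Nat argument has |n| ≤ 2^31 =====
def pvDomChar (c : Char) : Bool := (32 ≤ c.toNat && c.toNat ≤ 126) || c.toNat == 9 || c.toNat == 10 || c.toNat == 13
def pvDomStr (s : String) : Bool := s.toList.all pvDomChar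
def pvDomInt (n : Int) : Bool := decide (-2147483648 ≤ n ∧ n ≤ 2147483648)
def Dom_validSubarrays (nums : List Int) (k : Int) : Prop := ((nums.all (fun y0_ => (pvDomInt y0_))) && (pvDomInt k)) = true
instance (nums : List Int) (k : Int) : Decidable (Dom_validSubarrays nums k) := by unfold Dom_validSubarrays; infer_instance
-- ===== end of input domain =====

-- B replaces A's four staged passes over three dense arrays by ONE online pass with O(1)
-- state (last peak, its pending left-options, accumulator); objective: simpler.

-- ===== PORT A =====
-- the peak test 'nums[i] > max(nums[i-1], nums[i+1])'
def pvCond (nums : List Int) (i : Int) : Bool :=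
  decide (PySem.List.pyGetD nums i 0 > max (PySem.List.pyGetD nums (i-1) 0) (PySem.List.pyGetD nums (i+1) 0))

-- A's 'peak' boolean array: [False]*n, then peak[i] = True for interior strict peaks
def pvPeak (nums : List Int) : List Bool :=
  (PySem.List.pyRange 1 ((nums.length : Int) - 1) 1).foldl
    (fun a i => PySem.List.pySetD a i (pvCond nums i))
    (List.replicate nums.length false)

-- 'peak[i]' lookup
def pvPk (nums : List Int) (i : Int) : Bool := PySem.List.pyGetD (pvPeak nums) i false

-- the shared loop body of A's prevPeak/nextPeak scans: arr[i] = currPeak; if peak[i]: currPeak = i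
def pvStep (nums : List Int) (s : List Int × Int) (i : Int) : List Int × Int :=
  (PySem.List.pySetD s.1 i s.2, if pvPk nums i then i else s.2)

-- A's prevPeak array (scan over range(n))
def pvPrev (nums : List Int) : List Int :=
  ((PySem.List.pyRange 0 (nums.length : Int) 1).foldl (pvStep nums)
    (List.replicate nums.length (-1), -1)).1

-- A's nextPeak array (scan over range(n-1, -1, -1))
def pvNext (nums : List Int) : List Int :=
  ((PySem.List.pyRange ((nums.length : Int) - 1) (-1) (-1)).foldl (pvStep nums)
    (List.replicate nums.length (nums.length : Int), (nums.length : Int))).1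

def validSubarrays (nums : List Int) (k : Int) : Int :=
  (PySem.List.pyRange 1 ((nums.length : Int) - 1) 1).foldl
    (fun r i =>
      if pvPk nums i then
        let prevRange := PySem.List.pyGetD (pvPrev nums) i 0 + 1
        let nextRange := PySem.List.pyGetD (pvNext nums) i 0 - 1
        let leftOpts := min (k + 1) (i - prevRange + 1)
        let rightOpts := min (k + 1) (nextRange - i + 1)
        r + leftOpts * rightOpts
      else r) 0

-- ===== PORT B =====
-- B's peak test 'nums[i] > nums[i-1] and nums[i] > nums[i+1]'
def pvCond2 (nums : List Int) (i : Int) : Bool :=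
  decide (PySem.List.pyGetD nums i 0 > PySem.List.pyGetD nums (i-1) 0)
    && decide (PySem.List.pyGetD nums i 0 > PySem.List.pyGetD nums (i+1) 0)

-- B's loop state (res, prev, leftOpts) and body
def pvStepB (nums : List Int) (k : Int) (s : Int × Int × Int) (i : Int) : Int × Int × Int :=
  if pvCond2 nums i then
    let d := min (k + 1) (i - s.2.1)
    (s.1 + (if s.2.1 ≥ 0 then s.2.2 * d else 0), i, d)
  else s

def validSubarrays_alt (nums : List Int) (k : Int) : Int :=
  let n : Int := nums.length
  let s := (PySem.List.pyRange 1 (n - 1) 1).foldl (pvStepB nums k) (0, -1, 0)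
  s.1 + (if s.2.1 ≥ 0 then s.2.2 * min (k + 1) (n - s.2.1) else 0)

-- ===== PRECONDITION & SPEC =====
def Spec_validSubarrays (nums : List Int) (k : Int) (out : Int) : Prop := out = validSubarrays_alt nums k
instance (nums : List Int) (k : Int) (out : Int) : Decidable (Spec_validSubarrays nums k out) := by unfold Spec_validSubarrays; infer_instance

-- ===== CLAIM (what is proved, stated in full; the proofs are below) =====
def Claim_equal_validSubarrays : Prop := ∀ (nums : List Int) (k : Int), Dom_validSubarrays nums k → Spec_validSubarrays nums k (validSubarrays nums k)

-- ===== LEMMAS AND PROOFS =====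

-- A's sparse peaks list (proof helper)
def pvPeaks (nums : List Int) : List Int :=
  (PySem.List.pyRange 1 ((nums.length : Int) - 1) 1).filter (fun i => pvCond nums i)

-- pyGetD after an in-range pySetD
theorem pv_pyGetD_pySetD {α : Type} (xs : List α) (i j : Int) (v d : α)
    (h0 : 0 ≤ i) (h1 : i < (xs.length : Int)) (hj : 0 ≤ j) :
    PySem.List.pyGetD (PySem.List.pySetD xs i v) j d = if j = i then v else PySem.List.pyGetD xs j d := by
  rw [PySem.List.pySetD_of_nonneg xs v h0]
  by_cases h2 : j < (xs.length : Int)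
  · rw [PySem.List.pyGetD_eq_getElem _ d hj (by simpa using h2),
        PySem.List.pyGetD_eq_getElem xs d hj h2]
    rw [List.getElem_set]
    have hiff : i.toNat = j.toNat ↔ j = i := by omega
    by_cases hji : j = i
    · simp [hiff.2 hji, hji]
    · simp only [hji, if_false]
      rw [if_neg (fun h => hji (hiff.1 h))]
  · have hn1 : PySem.List.pyGet? (xs.set i.toNat v) j = none := by
      rw [PySem.List.pyGet?_eq_none_iff]
      simp only [PySem.Raise.InRange, List.length_set]
      omega
    have hn2 : PySem.List.pyGet? xs j = none := by
      rw [PySem.List.pyGet?_eq_none_iff]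
      simp only [PySem.Raise.InRange]
      omega
    rw [PySem.List.pyGetD_of_none _ _ _ hn1, PySem.List.pyGetD_of_none _ _ _ hn2]
    have : ¬ j = i := by omega
    simp [this]

theorem pv_pyGetD_replicate {α : Type} (n : Nat) (x : α) (j : Int) :
    PySem.List.pyGetD (List.replicate n x) j x = x := by
  cases h : PySem.List.pyGet? (List.replicate n x) j with
  | none => exact PySem.List.pyGetD_of_none _ _ _ h
  | some a =>
    have := PySem.List.mem_of_pyGet?_eq_some _ h
    have ha : a = x := List.eq_of_mem_replicate this
    simp [PySem.List.pyGetD, h, ha]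

-- a fold of in-range pySetD's, where the written value depends only on the index
theorem pv_foldl_pySetD_getD {α : Type} (f : Int → α) (L : List Int) (a : List α) (d : α)
    (hL : ∀ i ∈ L, 0 ≤ i ∧ i < (a.length : Int)) (j : Int) (hj : 0 ≤ j) :
    PySem.List.pyGetD (L.foldl (fun acc i => PySem.List.pySetD acc i (f i)) a) j d
      = if j ∈ L then f j else PySem.List.pyGetD a j d := by
  induction L generalizing a with
  | nil => simp
  | cons x L ih =>
    have hx := hL x (by simp)
    have hrec := ih (PySem.List.pySetD a x (f x))
      (by intro i hi; have := hL i (by simp [hi]); simpa [PySem.List.length_pySetD] using this)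
    rw [List.foldl_cons, hrec]
    rw [pv_pyGetD_pySetD a x j (f x) d hx.1 hx.2 hj]
    by_cases hjL : j ∈ L
    · simp [hjL]
    · by_cases hjx : j = x <;> simp [hjL, hjx]

-- characterisation of A's peak array
theorem pvPk_eq (nums : List Int) (i : Int) (hi : 0 ≤ i) :
    pvPk nums i = (decide (1 ≤ i ∧ i < (nums.length : Int) - 1) && pvCond nums i) := by
  unfold pvPk pvPeak
  rw [pv_foldl_pySetD_getD (pvCond nums) _ _ false
    (by intro x hx
        rw [PySem.List.mem_pyRange_one] at hx
        constructor <;> [omega; ·simp; omega]) i hi]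
  rw [pv_pyGetD_replicate]
  by_cases h : i ∈ PySem.List.pyRange 1 ((nums.length : Int) - 1) 1
  · have hb := PySem.List.mem_pyRange_one.1 h
    have hd : (1 ≤ i ∧ i < (nums.length : Int) - 1) := by omega
    simp [h, hd]
  · rw [PySem.List.mem_pyRange_one] at h
    rw [if_neg (by rw [PySem.List.mem_pyRange_one]; omega)]
    have hd : ¬ (1 ≤ i ∧ i < (nums.length : Int) - 1) := by omega
    simp [hd]

-- A's prevPeak scan: the running currPeak after the first m steps
def pvPf (nums : List Int) : Nat → Int
  | 0 => -1
  | m+1 => if pvPk nums (m : Int) then (m : Int) else pvPf nums m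

theorem pv_prev_scan (nums : List Int) (m : Nat) (hm : m ≤ nums.length) :
    (((PySem.List.pyRange 0 (m : Int) 1).foldl (pvStep nums)
        (List.replicate nums.length (-1), -1)).2 = pvPf nums m)
    ∧ (((PySem.List.pyRange 0 (m : Int) 1).foldl (pvStep nums)
        (List.replicate nums.length (-1), -1)).1.length = nums.length)
    ∧ (∀ j : Nat, j < nums.length →
        PySem.List.pyGetD ((PySem.List.pyRange 0 (m : Int) 1).foldl (pvStep nums)
          (List.replicate nums.length (-1), -1)).1 (j : Int) 0
        = if j < m then pvPf nums j else -1) := by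
  induction m with
  | zero =>
    simp only [Nat.cast_zero]
    rw [PySem.List.pyRange_one_eq_nil (by omega)]
    refine ⟨rfl, by simp, ?_⟩
    intro j hj
    simp only [List.foldl_nil]
    rw [PySem.List.pyGetD_eq_getElem _ 0 (by omega) (by simpa using hj)]
    simp
  | succ m ih =>
    obtain ⟨ih1, ih2, ih3⟩ := ih (by omega)
    have hsplit : PySem.List.pyRange 0 ((m + 1 : Nat) : Int) 1
        = PySem.List.pyRange 0 (m : Int) 1 ++ [(m : Int)] := by
      push_cast
      exact PySem.List.pyRange_one_succ_right (by omega)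
    rw [hsplit, List.foldl_append]
    refine ⟨?_, ?_, ?_⟩
    · simp only [List.foldl_cons, List.foldl_nil, pvStep]
      rw [ih1]
      rfl
    · simp only [List.foldl_cons, List.foldl_nil, pvStep, PySem.List.length_pySetD]
      exact ih2
    · intro j hj
      simp only [List.foldl_cons, List.foldl_nil, pvStep]
      rw [pv_pyGetD_pySetD _ _ _ _ _ (by omega) (by rw [ih2]; omega) (by omega)]
      by_cases hjm : j = m
      · subst hjm
        rw [if_pos rfl, ih1, if_pos (by omega)]
      · rw [if_neg (by omega), ih3 j hj]
        have hiff : (j < m + 1) ↔ (j < m) := by omega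
        simp only [hiff]

theorem pv_pyRange_neg_succ (a b : Int) (h : b < a) :
    PySem.List.pyRange a b (-1) = PySem.List.pyRange a (b + 1) (-1) ++ [b + 1] := by
  rw [PySem.List.pyRange_neg_one_eq_reverse, PySem.List.pyRange_neg_one_eq_reverse,
      PySem.List.pyRange_one_cons (by omega)]
  simp [add_assoc]

-- A's nextPeak scan: the running currPeak after processing the top t indices
def pvM (nums : List Int) : Nat → Int
  | 0 => (nums.length : Int)
  | t+1 => if pvPk nums ((nums.length : Int) - 1 - (t : Int)) then (nums.length : Int) - 1 - (t : Int) else pvM nums t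

theorem pv_next_scan (nums : List Int) (t : Nat) (ht : t ≤ nums.length) :
    (((PySem.List.pyRange ((nums.length : Int) - 1) ((nums.length : Int) - 1 - (t : Int)) (-1)).foldl (pvStep nums)
        (List.replicate nums.length (nums.length : Int), (nums.length : Int))).2 = pvM nums t)
    ∧ (((PySem.List.pyRange ((nums.length : Int) - 1) ((nums.length : Int) - 1 - (t : Int)) (-1)).foldl (pvStep nums)
        (List.replicate nums.length (nums.length : Int), (nums.length : Int))).1.length = nums.length)
    ∧ (∀ j : Nat, j < nums.length →
        PySem.List.pyGetD ((PySem.List.pyRange ((nums.length : Int) - 1) ((nums.length : Int) - 1 - (t : Int)) (-1)).foldl (pvStep nums)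
          (List.replicate nums.length (nums.length : Int), (nums.length : Int))).1 (j : Int) 0
        = if nums.length - t ≤ j then pvM nums (nums.length - 1 - j) else (nums.length : Int)) := by
  induction t with
  | zero =>
    simp only [Nat.cast_zero, sub_zero]
    rw [PySem.List.pyRange_neg_one_eq_nil (by omega)]
    refine ⟨rfl, by simp, ?_⟩
    intro j hj
    simp only [List.foldl_nil]
    rw [PySem.List.pyGetD_eq_getElem _ 0 (by omega) (by simpa using hj)]
    rw [if_neg (by omega)]
    simp
  | succ t ih =>
    obtain ⟨ih1, ih2, ih3⟩ := ih (by omega)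
    have hsplit : PySem.List.pyRange ((nums.length : Int) - 1) ((nums.length : Int) - 1 - ((t + 1 : Nat) : Int)) (-1)
        = PySem.List.pyRange ((nums.length : Int) - 1) ((nums.length : Int) - 1 - (t : Int)) (-1)
          ++ [(nums.length : Int) - 1 - (t : Int)] := by
      push_cast
      have h1 : ((nums.length : Int) - 1 - ((t : Int) + 1)) = ((nums.length : Int) - 1 - (t : Int) - 1) := by ring
      have h2 : ((nums.length : Int) - 1 - (t : Int) - 1) + 1 = (nums.length : Int) - 1 - (t : Int) := by ring
      rw [h1, pv_pyRange_neg_succ _ _ (by omega), h2]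
    rw [hsplit, List.foldl_append]
    refine ⟨?_, ?_, ?_⟩
    · simp only [List.foldl_cons, List.foldl_nil, pvStep]
      rw [ih1]
      rfl
    · simp only [List.foldl_cons, List.foldl_nil, pvStep, PySem.List.length_pySetD]
      exact ih2
    · intro j hj
      simp only [List.foldl_cons, List.foldl_nil, pvStep]
      rw [pv_pyGetD_pySetD _ _ _ _ _ (by omega) (by rw [ih2]; omega) (by omega)]
      by_cases hjm : (j : Int) = (nums.length : Int) - 1 - (t : Int)
      · rw [if_pos hjm, ih1, if_pos (by omega)]
        have hje : nums.length - 1 - j = t := by omega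
        rw [hje]
      · rw [if_neg hjm, ih3 j hj]
        have hiff : (nums.length - t ≤ j) ↔ (nums.length - (t + 1) ≤ j) := by omega
        simp only [hiff]

-- the peaks filtered from the prefix range(0, m)
def pvFA (nums : List Int) (m : Int) : List Int :=
  (PySem.List.pyRange 0 m 1).filter (fun i => pvPk nums i)

theorem pv_pf_eq (nums : List Int) (m : Nat) :
    pvPf nums m = (pvFA nums (m : Int)).getLastD (-1) := by
  induction m with
  | zero =>
    simp [pvFA, pvPf, PySem.List.pyRange_one_eq_nil (by omega : (0:Int) ≤ 0)]
  | succ m ih =>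
    have hsplit : pvFA nums ((m + 1 : Nat) : Int)
        = pvFA nums (m : Int) ++ (if pvPk nums (m : Int) then [(m : Int)] else []) := by
      unfold pvFA
      have hr : PySem.List.pyRange 0 ((m + 1 : Nat) : Int) 1
          = PySem.List.pyRange 0 (m : Int) 1 ++ [(m : Int)] := by
        push_cast
        exact PySem.List.pyRange_one_succ_right (by omega)
      rw [hr, List.filter_append]
      simp [List.filter_cons]
    rw [hsplit]
    cases h : pvPk nums (m : Int) with
    | true => simp [pvPf, h]
    | false => simp [pvPf, h, ih]

theorem pv_M_eq (nums : List Int) (t : Nat) (ht : t ≤ nums.length) :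
    pvM nums t = ((PySem.List.pyRange ((nums.length : Int) - (t : Int)) (nums.length : Int) 1).filter
      (fun i => pvPk nums i)).headD (nums.length : Int) := by
  induction t with
  | zero =>
    simp [pvM, PySem.List.pyRange_one_eq_nil (by omega : (nums.length : Int) ≤ (nums.length : Int))]
  | succ t ih =>
    have h0 : (nums.length : Int) - ((t + 1 : Nat) : Int) = (nums.length : Int) - 1 - (t : Int) := by
      push_cast; ring
    rw [h0, PySem.List.pyRange_one_cons (by omega)]
    have h1 : (nums.length : Int) - 1 - (t : Int) + 1 = (nums.length : Int) - (t : Int) := by ring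
    rw [h1, List.filter_cons]
    cases h : pvPk nums ((nums.length : Int) - 1 - (t : Int)) with
    | true => simp [pvM, h]
    | false => simp [pvM, h, ih (by omega)]

theorem pv_FA_mem (nums : List Int) (m : Int) (i : Int) (h : i ∈ pvFA nums m) :
    0 ≤ i ∧ i < m ∧ pvPk nums i = true := by
  rcases List.mem_filter.1 h with ⟨h1, h2⟩
  rw [PySem.List.mem_pyRange_one] at h1
  exact ⟨h1.1, h1.2, by simpa using h2⟩

theorem pv_FA_take (nums : List Int) (m : Nat) (kk : Nat) (h : kk < (pvFA nums (m : Int)).length) :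
    pvFA nums ((pvFA nums (m : Int))[kk]) = (pvFA nums (m : Int)).take kk := by
  induction m generalizing kk with
  | zero =>
    exfalso
    have hnil : pvFA nums ((0 : Nat) : Int) = [] := by
      simp [pvFA, PySem.List.pyRange_one_eq_nil (by omega : (0:Int) ≤ 0)]
    rw [hnil] at h
    simp at h
  | succ m ih =>
    have hsplit : pvFA nums ((m + 1 : Nat) : Int)
        = pvFA nums (m : Int) ++ (if pvPk nums (m : Int) then [(m : Int)] else []) := by
      unfold pvFA
      have hr : PySem.List.pyRange 0 ((m + 1 : Nat) : Int) 1
          = PySem.List.pyRange 0 (m : Int) 1 ++ [(m : Int)] := by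
        push_cast
        exact PySem.List.pyRange_one_succ_right (by omega)
      rw [hr, List.filter_append]
      simp [List.filter_cons]
    have h1 : (pvFA nums ((m + 1 : Nat) : Int))[kk] = (pvFA nums ((m + 1 : Nat) : Int)).getD kk 0 :=
      (List.getD_eq_getElem _ 0 h).symm
    have hlen : (pvFA nums ((m + 1 : Nat) : Int)).length
        = (pvFA nums (m : Int)).length + (if pvPk nums (m : Int) then [(m : Int)] else []).length := by
      rw [hsplit, List.length_append]
    by_cases hk : kk < (pvFA nums (m : Int)).length
    · have hval : (pvFA nums ((m + 1 : Nat) : Int))[kk] = (pvFA nums (m : Int))[kk] := by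
        rw [h1, hsplit, List.getD_append _ _ _ _ hk]
        exact List.getD_eq_getElem _ 0 hk
      rw [hval, hsplit, List.take_append_of_le_length (le_of_lt hk)]
      exact ih kk hk
    · cases hpk : pvPk nums (m : Int) with
      | false =>
        exfalso
        rw [hpk] at hlen
        simp only [Bool.false_eq_true, if_false, List.length_nil] at hlen
        omega
      | true =>
        have hkeq : kk = (pvFA nums (m : Int)).length := by
          rw [hpk] at hlen
          simp only [if_true, List.length_cons, List.length_nil] at hlen
          omega
        have hval : (pvFA nums ((m + 1 : Nat) : Int))[kk] = (m : Int) := by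
          rw [h1, hsplit, hpk]
          simp only [if_true]
          rw [List.getD_append_right _ _ _ _ (by omega), hkeq]
          simp
        rw [hval, hsplit, hpk]
        simp only [if_true]
        rw [hkeq, List.take_left]

theorem pv_filterR_eq (nums : List Int) :
    (PySem.List.pyRange 1 ((nums.length : Int) - 1) 1).filter (fun i => pvPk nums i) = pvPeaks nums := by
  unfold pvPeaks
  apply List.filter_congr
  intro i hi
  rw [PySem.List.mem_pyRange_one] at hi
  rw [pvPk_eq nums i (by omega)]
  have hb : (1 ≤ i ∧ i < (nums.length : Int) - 1) := by omega
  simp [hb]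

theorem pv_PA_eq_peaks (nums : List Int) :
    pvFA nums (nums.length : Int) = pvPeaks nums := by
  by_cases hn : nums.length ≤ 1
  · have hL : pvFA nums (nums.length : Int) = [] := by
      unfold pvFA
      rw [List.filter_eq_nil_iff]
      intro i hi
      rw [PySem.List.mem_pyRange_one] at hi
      rw [pvPk_eq nums i (by omega)]
      simp only [Bool.and_eq_true, decide_eq_true_eq]
      intro hc
      omega
    have hR : pvPeaks nums = [] := by
      unfold pvPeaks
      rw [PySem.List.pyRange_one_eq_nil (by omega)]
      rfl
    rw [hL, hR]
  · have h0 : pvPk nums 0 = false := by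
      rw [pvPk_eq nums 0 (by omega)]
      simp
    have hlast : pvPk nums ((nums.length : Int) - 1) = false := by
      rw [pvPk_eq nums _ (by omega)]
      simp only [Bool.and_eq_false_iff, decide_eq_false_iff_not]
      left
      intro hc
      omega
    unfold pvFA pvPeaks
    rw [show PySem.List.pyRange 0 (nums.length : Int) 1
        = PySem.List.pyRange 0 1 1 ++ PySem.List.pyRange 1 (nums.length : Int) 1 from
      PySem.List.pyRange_one_append 0 1 (nums.length : Int) (by omega) (by omega)]
    rw [show PySem.List.pyRange 1 (nums.length : Int) 1
        = PySem.List.pyRange 1 ((nums.length : Int) - 1) 1 ++ PySem.List.pyRange ((nums.length : Int) - 1) (nums.length : Int) 1 from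
      PySem.List.pyRange_one_append 1 ((nums.length : Int) - 1) (nums.length : Int) (by omega) (by omega)]
    rw [show PySem.List.pyRange 0 1 1 = [0] from by decide]
    rw [PySem.List.pyRange_one_cons (a := (nums.length : Int) - 1) (b := (nums.length : Int)) (by omega),
        PySem.List.pyRange_one_eq_nil (a := (nums.length : Int) - 1 + 1) (b := (nums.length : Int)) (by omega)]
    simp only [List.filter_append, List.filter_cons, List.filter_nil, h0, hlast]
    simp only [Bool.false_eq_true, if_false, List.nil_append, List.append_nil]
    exact pv_filterR_eq nums

-- fold shapes
theorem pv_foldl_if_add (L : List Int) (p : Int → Bool) (f : Int → Int) (init : Int) :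
    L.foldl (fun r i => if p i then r + f i else r) init = init + ((L.filter p).map f).sum := by
  induction L generalizing init with
  | nil => simp
  | cons x L ih =>
    rw [List.foldl_cons, List.filter_cons]
    cases h : p x with
    | true => simp [ih, add_assoc]
    | false => simp [ih]

-- one step of the prefix-peaks list
theorem pv_FA_succ (nums : List Int) (m : Nat) :
    pvFA nums ((m + 1 : Nat) : Int)
      = pvFA nums (m : Int) ++ (if pvPk nums (m : Int) then [(m : Int)] else []) := by
  unfold pvFA
  have hr : PySem.List.pyRange 0 ((m + 1 : Nat) : Int) 1
      = PySem.List.pyRange 0 (m : Int) 1 ++ [(m : Int)] := by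
    push_cast
    exact PySem.List.pyRange_one_succ_right (by omega)
  rw [hr, List.filter_append]
  simp [List.filter_cons]

theorem pv_take_getLastD (l : List Int) (kk : Nat) (hkk : kk ≤ l.length) :
    (l.take kk).getLastD (-1) = if 0 < kk then l.getD (kk - 1) 0 else -1 := by
  cases kk with
  | zero => simp
  | succ kk =>
    rw [if_pos (by omega)]
    have hlt : kk < l.length := by omega
    have hc : l.take (kk + 1) = l.take kk ++ [l[kk]] := by
      rw [List.take_add_one, List.getElem?_eq_getElem hlt]
      rfl
    rw [hc, List.getLastD_concat]
    rw [show kk + 1 - 1 = kk from rfl, List.getD_eq_getElem _ _ hlt]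

theorem pv_drop_headD (l : List Int) (kk : Nat) (d : Int) :
    (l.drop kk).headD d = if kk < l.length then l.getD kk d else d := by
  rw [List.headD_eq_head?, List.head?_drop]
  by_cases h : kk < l.length
  · rw [List.getElem?_eq_getElem h, if_pos h, List.getD_eq_getElem _ _ h]
    rfl
  · rw [List.getElem?_eq_none (by omega), if_neg h]
    rfl

theorem pv_FA_split (nums : List Int) (p : Int) (h0 : 0 ≤ p) (h1 : p + 1 ≤ (nums.length : Int)) :
    pvFA nums (nums.length : Int)
      = pvFA nums (p + 1)
        ++ (PySem.List.pyRange (p + 1) (nums.length : Int) 1).filter (fun i => pvPk nums i) := by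
  unfold pvFA
  rw [← List.filter_append, ← PySem.List.pyRange_one_append 0 (p + 1) (nums.length : Int) (by omega) (by omega)]

-- neighbour values of A's arrays at the kk-th peak
theorem pv_prev_at_peak (nums : List Int) (kk : Nat) (h : kk < (pvFA nums (nums.length : Int)).length) :
    PySem.List.pyGetD (pvPrev nums) ((pvFA nums (nums.length : Int))[kk]) 0
      = if 0 < kk then (pvFA nums (nums.length : Int)).getD (kk - 1) 0 else -1 := by
  have hmem : (pvFA nums (nums.length : Int))[kk] ∈ pvFA nums (nums.length : Int) := List.getElem_mem h
  obtain ⟨hp0, hpn, hpk⟩ := pv_FA_mem nums _ _ hmem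
  have hcast : (pvFA nums (nums.length : Int))[kk] = (((pvFA nums (nums.length : Int))[kk]).toNat : Int) := by
    omega
  obtain ⟨-, -, hscan⟩ := pv_prev_scan nums nums.length (le_refl _)
  have hget := hscan ((pvFA nums (nums.length : Int))[kk]).toNat (by omega)
  rw [if_pos (by omega)] at hget
  unfold pvPrev
  rw [hcast, hget, pv_pf_eq, ← hcast, pv_FA_take nums nums.length kk h]
  exact pv_take_getLastD _ kk (by omega)

theorem pv_next_at_peak (nums : List Int) (kk : Nat) (h : kk < (pvFA nums (nums.length : Int)).length) :
    PySem.List.pyGetD (pvNext nums) ((pvFA nums (nums.length : Int))[kk]) 0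
      = if kk + 1 < (pvFA nums (nums.length : Int)).length
        then (pvFA nums (nums.length : Int)).getD (kk + 1) 0 else (nums.length : Int) := by
  have hmem : (pvFA nums (nums.length : Int))[kk] ∈ pvFA nums (nums.length : Int) := List.getElem_mem h
  obtain ⟨hp0, hpn, hpk⟩ := pv_FA_mem nums _ _ hmem
  have hcast : (pvFA nums (nums.length : Int))[kk] = (((pvFA nums (nums.length : Int))[kk]).toNat : Int) := by
    omega
  obtain ⟨-, -, hscan⟩ := pv_next_scan nums nums.length (le_refl _)
  have he : (nums.length : Int) - 1 - ((nums.length : Nat) : Int) = -1 := by ring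
  rw [he] at hscan
  have hget := hscan ((pvFA nums (nums.length : Int))[kk]).toNat (by omega)
  rw [if_pos (by omega)] at hget
  unfold pvNext
  rw [hcast, hget, pv_M_eq nums _ (by omega)]
  have he2 : (nums.length : Int) - ((nums.length - 1 - ((pvFA nums (nums.length : Int))[kk]).toNat : Nat) : Int)
      = (pvFA nums (nums.length : Int))[kk] + 1 := by omega
  rw [he2]
  have hsplitR := pv_FA_split nums ((pvFA nums (nums.length : Int))[kk]) hp0 (by omega)
  have htake : pvFA nums ((pvFA nums (nums.length : Int))[kk] + 1)
      = (pvFA nums (nums.length : Int)).take (kk + 1) := by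
    have hc2 : (pvFA nums (nums.length : Int))[kk] + 1
        = ((((pvFA nums (nums.length : Int))[kk]).toNat + 1 : Nat) : Int) := by omega
    rw [hc2, pv_FA_succ nums (((pvFA nums (nums.length : Int))[kk]).toNat), ← hcast,
      pv_FA_take nums nums.length kk h, hpk]
    simp only [if_true]
    rw [List.take_add_one, List.getElem?_eq_getElem h]
    rfl
  have hdrop : (PySem.List.pyRange ((pvFA nums (nums.length : Int))[kk] + 1) (nums.length : Int) 1).filter
      (fun i => pvPk nums i) = (pvFA nums (nums.length : Int)).drop (kk + 1) := by
    have hx := hsplitR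
    rw [htake] at hx
    conv at hx => lhs; rw [← List.take_append_drop (kk + 1) (pvFA nums (nums.length : Int))]
    exact (List.append_cancel_left hx.symm)
  rw [hdrop, pv_drop_headD]
  by_cases hkk : kk + 1 < (pvFA nums (nums.length : Int)).length
  · rw [if_pos hkk, if_pos hkk, List.getD_eq_getElem _ _ hkk, List.getD_eq_getElem _ _ hkk]
  · rw [if_neg hkk, if_neg hkk]

-- == the bridge: recursive gap-sum over the peaks list ==
-- pvGB n k p ps : Σ over ps of min(k+1, cur - prevPeak) * min(k+1, nextPeak - cur),
-- with prevPeak chained from p and nextPeak defaulting to n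
def pvGB (n k : Int) : Int → List Int → Int
  | _, [] => 0
  | p, x :: xs => min (k + 1) (x - p) * min (k + 1) ((xs.headD n) - x) + pvGB n k x xs

-- the same sum written with positional neighbour lookups (A's shape)
def pvNbrTerm (n k : Int) (p : Int) (ps : List Int) (kk : Nat) : Int :=
  min (k + 1) (ps.getD kk 0 - (if 0 < kk then ps.getD (kk - 1) 0 else p))
    * min (k + 1) ((if kk + 1 < ps.length then ps.getD (kk + 1) 0 else n) - ps.getD kk 0)

def pvNbr (n k : Int) (p : Int) (ps : List Int) : Int :=
  ((List.range ps.length).map (pvNbrTerm n k p ps)).sum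

theorem pv_nbr_eq_gb (n k : Int) (ps : List Int) (p : Int) :
    pvNbr n k p ps = pvGB n k p ps := by
  induction ps generalizing p with
  | nil => simp [pvNbr, pvGB]
  | cons x xs ih =>
    unfold pvNbr
    rw [show (x :: xs).length = xs.length + 1 from rfl, List.range_succ_eq_map]
    rw [List.map_cons, List.map_map, List.sum_cons]
    have hterm0 : pvNbrTerm n k p (x :: xs) 0
        = min (k + 1) (x - p) * min (k + 1) ((xs.headD n) - x) := by
      unfold pvNbrTerm
      simp only [Nat.lt_irrefl, if_false, List.getD_cons_zero, zero_add, List.length_cons]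
      congr 2
      cases xs with
      | nil => simp
      | cons y ys => simp
    have hmap : (List.range xs.length).map (pvNbrTerm n k p (x :: xs) ∘ Nat.succ)
        = (List.range xs.length).map (pvNbrTerm n k x xs) := by
      apply List.map_congr_left
      intro kk hkk
      rw [List.mem_range] at hkk
      simp only [Function.comp]
      unfold pvNbrTerm
      have e1 : (x :: xs).getD (Nat.succ kk) 0 = xs.getD kk 0 := rfl
      have e2 : (x :: xs).getD (Nat.succ kk + 1) 0 = xs.getD (kk + 1) 0 := rfl
      have e3 : (if 0 < Nat.succ kk then (x :: xs).getD (Nat.succ kk - 1) 0 else p)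
          = (if 0 < kk then xs.getD (kk - 1) 0 else x) := by
        rw [if_pos (Nat.succ_pos kk)]
        cases kk with
        | zero => simp
        | succ m => simp
      have e4 : (if Nat.succ kk + 1 < (x :: xs).length then (x :: xs).getD (Nat.succ kk + 1) 0 else n)
          = (if kk + 1 < xs.length then xs.getD (kk + 1) 0 else n) := by
        by_cases h : kk + 1 < xs.length
        · rw [if_pos (by simp only [List.length_cons]; omega), if_pos h, e2]
        · rw [if_neg (by simp only [List.length_cons]; omega), if_neg h]
      rw [e1, e3, e4]
    rw [hterm0, hmap]
    have := ih x
    unfold pvNbr at this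
    rw [this]
    rfl

-- filtering the guard out of a fold
theorem pv_foldl_guard {σ : Type} (L : List Int) (p : Int → Bool) (f : σ → Int → σ) (init : σ) :
    L.foldl (fun s i => if p i then f s i else s) init = (L.filter p).foldl f init := by
  induction L generalizing init with
  | nil => rfl
  | cons x L ih =>
    rw [List.foldl_cons, List.filter_cons]
    cases h : p x with
    | true => simp only [if_true, List.foldl_cons]; exact ih (f init x)
    | false => simp only [Bool.false_eq_true, if_false]; exact ih init

-- the two peak tests agree
theorem pv_cond2_eq (nums : List Int) (i : Int) : pvCond2 nums i = pvCond nums i := by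
  unfold pvCond2 pvCond
  rw [← Bool.decide_and]
  congr 1
  rw [eq_iff_iff]
  simp only [gt_iff_lt, max_lt_iff]

-- B's unguarded step on the peaks list
def pvStepB' (k : Int) (s : Int × Int × Int) (i : Int) : Int × Int × Int :=
  (s.1 + (if s.2.1 ≥ 0 then s.2.2 * min (k + 1) (i - s.2.1) else 0), i, min (k + 1) (i - s.2.1))

-- B's streaming fold with final settlement computes the gap-sum
theorem pv_foldB_gb (n k : Int) (ps : List Int) (hps : ∀ x ∈ ps, 0 ≤ x)
    (r p lo : Int) :
    (ps.foldl (pvStepB' k) (r, p, lo)).1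
      + (if (ps.foldl (pvStepB' k) (r, p, lo)).2.1 ≥ 0
         then (ps.foldl (pvStepB' k) (r, p, lo)).2.2
              * min (k + 1) (n - (ps.foldl (pvStepB' k) (r, p, lo)).2.1) else 0)
      = r + (if p ≥ 0 then lo * min (k + 1) ((ps.headD n) - p) else 0) + pvGB n k p ps := by
  induction ps generalizing r p lo with
  | nil => simp [pvGB]
  | cons x xs ih =>
    have hx : 0 ≤ x := hps x (by simp)
    rw [List.foldl_cons]
    rw [show pvStepB' k (r, p, lo) x
        = (r + (if p ≥ 0 then lo * min (k + 1) (x - p) else 0), x, min (k + 1) (x - p)) from rfl]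
    rw [ih (fun y hy => hps y (by simp [hy])) _ x _]
    rw [if_pos (show x ≥ 0 from hx)]
    simp only [pvGB, List.headD_cons]
    ring

-- ===== VERDICT (by name: the statement is the Claim_ definition above) =====
theorem validSubarrays_spec : Claim_equal_validSubarrays := by
  intro nums k _
  unfold Spec_validSubarrays
  -- A equals the neighbour-lookup sum over the peaks list
  have hA : validSubarrays nums k = pvNbr (nums.length : Int) k (-1) (pvFA nums (nums.length : Int)) := by
    unfold validSubarrays
    rw [show (fun (r : Int) (i : Int) =>
        if pvPk nums i then
          let prevRange := PySem.List.pyGetD (pvPrev nums) i 0 + 1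
          let nextRange := PySem.List.pyGetD (pvNext nums) i 0 - 1
          let leftOpts := min (k + 1) (i - prevRange + 1)
          let rightOpts := min (k + 1) (nextRange - i + 1)
          r + leftOpts * rightOpts
        else r)
      = (fun (r : Int) (i : Int) =>
        if pvPk nums i then
          r + min (k + 1) (i - (PySem.List.pyGetD (pvPrev nums) i 0 + 1) + 1)
            * min (k + 1) ((PySem.List.pyGetD (pvNext nums) i 0 - 1) - i + 1)
        else r) from rfl]
    rw [pv_foldl_if_add, zero_add, pv_filterR_eq, ← pv_PA_eq_peaks]
    unfold pvNbr
    apply congrArg List.sum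
    apply List.ext_getElem
    · simp
    · intro kk h1 h2
      rw [List.getElem_map, List.getElem_map, List.getElem_range]
      have hkk : kk < (pvFA nums (nums.length : Int)).length := by simpa using h1
      unfold pvNbrTerm
      rw [pv_prev_at_peak nums kk hkk, pv_next_at_peak nums kk hkk,
          List.getD_eq_getElem _ _ hkk]
      generalize (if 0 < kk then (pvFA nums (nums.length : Int)).getD (kk - 1) 0 else -1) = v
      generalize (if kk + 1 < (pvFA nums (nums.length : Int)).length
        then (pvFA nums (nums.length : Int)).getD (kk + 1) 0 else (nums.length : Int)) = w
      rw [show ∀ p : Int, p - (v + 1) + 1 = p - v from fun p => by ring]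
      rw [show ∀ p : Int, (w - 1) - p + 1 = w - p from fun p => by ring]
  -- B equals the recursive gap-sum over the same peaks list
  have hB : validSubarrays_alt nums k = pvGB (nums.length : Int) k (-1) (pvFA nums (nums.length : Int)) := by
    have hs : (PySem.List.pyRange 1 ((nums.length : Int) - 1) 1).foldl (pvStepB nums k) (0, -1, 0)
        = (pvFA nums (nums.length : Int)).foldl (pvStepB' k) (0, -1, 0) := by
      rw [show pvStepB nums k = (fun s i => if pvCond2 nums i then pvStepB' k s i else s) from by
        funext s i; unfold pvStepB pvStepB'; rfl]
      rw [pv_foldl_guard]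
      congr 1
      rw [pv_PA_eq_peaks]
      unfold pvPeaks
      exact List.filter_congr (fun i _ => pv_cond2_eq nums i)
    simp only [validSubarrays_alt]
    rw [hs]
    have := pv_foldB_gb (nums.length : Int) k (pvFA nums (nums.length : Int))
      (fun x hx => (pv_FA_mem nums _ x hx).1) 0 (-1) 0
    simp only [show ¬ ((-1 : Int) ≥ 0) from by omega, if_false, add_zero, zero_add] at this
    exact this
  rw [hA, hB, pv_nbr_eq_gb]
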